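-- pv_equiv track=rewrite | github.com/samarthraj/Question_Solve | Q4_180225.py | solve
-- ===== SOURCE A (Python) =====
-- def solve(arr):
--     i = 0
--     j = 0
--     max_index = 0
--
--     for k in range(0, len(arr)):
--         if arr[k] > i:
--             j = i
--             i = arr[k]
--             max_index = k
--         if j <= i and arr[k] > j and max_index != k:
--             j = arr[k]
--
--     return (i-1)*(j-1)
-- ===== SOURCE B (Python) =====
-- def solve(arr):
--     s = sorted(arr, reverse=True)
--     a = s[0] if s and s[0] > 0 else 0
--     b = s[1] if len(s) > 1 and s[1] > 0 else 0
--     return (a - 1) * (b - 1)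
-- ===== Notes on version B (the rewrite author's own statement) =====
-- stated objective: idiomatic
-- what changed: Replaces the manual single-pass max/second-max tracking (with a max_index guard) by sort-then-select: sort descending and read the top two entries, flooring each at 0 as A's zero initialisation does.
import Mathlib
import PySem

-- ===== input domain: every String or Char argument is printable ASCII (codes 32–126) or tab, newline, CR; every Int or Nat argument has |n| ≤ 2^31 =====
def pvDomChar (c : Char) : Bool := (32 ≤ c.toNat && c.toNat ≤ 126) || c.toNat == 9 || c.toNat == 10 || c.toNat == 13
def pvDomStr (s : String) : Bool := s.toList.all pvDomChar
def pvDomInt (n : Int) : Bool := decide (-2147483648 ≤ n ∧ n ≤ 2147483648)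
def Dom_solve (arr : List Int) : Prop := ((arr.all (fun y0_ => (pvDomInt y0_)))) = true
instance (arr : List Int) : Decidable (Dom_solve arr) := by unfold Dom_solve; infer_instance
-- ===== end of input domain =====

-- B replaces A's single-pass max/second-max tracking by sort-descending-then-read-top-two (idiomatic; not faster).

-- ===== PORT A =====
-- the for-k-in-range(0,len(arr)) loop over arr[k], carrying (i, j, max_index) and the running index k;
-- each iteration applies the two ifs of A's body in order (after the first if fires, max_index = k,
-- so in that case the second if's 'max_index != k' test compares k with k, exactly as in A)
def solveGo : List Int → Nat → Int → Int → Int → Int × Int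
  | [], _, i, j, _ => (i, j)
  | x :: rest, k, i, j, mi =>
      if x > i then
        -- j = i; i = x; max_index = k, then the second if with the updated state
        if i ≤ x ∧ x > i ∧ (k : Int) ≠ (k : Int) then solveGo rest (k + 1) x x (k : Int)
        else solveGo rest (k + 1) x i (k : Int)
      else
        if j ≤ i ∧ x > j ∧ mi ≠ (k : Int) then solveGo rest (k + 1) i x mi
        else solveGo rest (k + 1) i j mi

def solve (arr : List Int) : Int :=
  let r := solveGo arr 0 0 0 0
  (r.1 - 1) * (r.2 - 1)

-- ===== PORT B =====
def solve_alt (arr : List Int) : Int :=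
  let s := PySem.List.sorted arr (fun x => x) true
  let a : Int := match s with
    | [] => 0
    | x :: _ => if x > 0 then x else 0
  let b : Int := match s with
    | _ :: y :: _ => if y > 0 then y else 0
    | _ => 0
  (a - 1) * (b - 1)

-- ===== PRECONDITION & SPEC =====
def Spec_solve (arr : List Int) (out : Int) : Prop := out = solve_alt arr
instance (arr : List Int) (out : Int) : Decidable (Spec_solve arr out) := by unfold Spec_solve; infer_instance

-- ===== CLAIM (what is proved, stated in full; the proofs are below) =====
def Claim_equal_solve : Prop := ∀ (arr : List Int), Dom_solve arr → Spec_solve arr (solve arr)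

-- ===== LEMMAS AND PROOFS =====

/-- the index-free top-two step that A's loop body implements -/
def step2 (s : Int × Int) (x : Int) : Int × Int :=
  if x > s.1 then (x, s.1) else if x > s.2 then (s.1, x) else s

lemma step2_right_comm : ∀ (s : Int × Int) (a b : Int),
    step2 (step2 s a) b = step2 (step2 s b) a := by
  intro s a b
  simp only [step2]
  split_ifs <;> simp_all <;> omega

/-- A's loop with a past max_index is the index-free fold -/
lemma solveGo_eq_foldl : ∀ (l : List Int) (k : Nat) (i j mi : Int),
    mi < (k : Int) → 0 ≤ j → j ≤ i →
    solveGo l k i j mi = l.foldl step2 (i, j) := by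
  intro l
  induction l with
  | nil => intro k i j mi _ _ _; rfl
  | cons x rest ih =>
    intro k i j mi hmi hj hji
    rw [solveGo, List.foldl_cons]
    by_cases hxi : x > i
    · rw [if_pos hxi, if_neg (by omega), show step2 (i, j) x = (x, i) by simp [step2, hxi]]
      exact ih (k + 1) x i (k : Int) (by push_cast; omega) (by omega) (by omega)
    · rw [if_neg hxi]
      by_cases hxj : x > j
      · rw [if_pos ⟨hji, hxj, by omega⟩,
            show step2 (i, j) x = (i, x) by simp only [step2]; rw [if_neg hxi, if_pos hxj]]
        exact ih (k + 1) i x mi (by push_cast; omega) (by omega) (by omega)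
      · rw [if_neg (by tauto),
            show step2 (i, j) x = (i, j) by simp only [step2]; rw [if_neg hxi, if_neg hxj]]
        exact ih (k + 1) i j mi (by push_cast; omega) hj hji

/-- at index 0 the initial max_index = 0 coincides with k, but both branches agree with step2 -/
lemma solveGo_zero (arr : List Int) :
    solveGo arr 0 0 0 0 = arr.foldl step2 (0, 0) := by
  cases arr with
  | nil => rfl
  | cons x rest =>
    rw [solveGo, List.foldl_cons]
    by_cases hx : x > (0 : Int)
    · rw [if_pos hx, if_neg (by omega), show step2 (0, 0) x = (x, 0) by simp [step2, hx]]
      exact solveGo_eq_foldl rest 1 x 0 0 (by norm_num) le_rfl (by omega)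
    · rw [if_neg hx, if_neg (by omega),
          show step2 (0, 0) x = (0, 0) by simp only [step2]; rw [if_neg hx, if_neg hx]]
      exact solveGo_eq_foldl rest 1 0 0 0 (by norm_num) le_rfl le_rfl

/-- elements dominated by both components leave the fold state unchanged -/
lemma foldl_step2_noop : ∀ (l : List Int) (i j : Int),
    (∀ z ∈ l, z ≤ i ∧ z ≤ j) → l.foldl step2 (i, j) = (i, j) := by
  intro l
  induction l with
  | nil => intro i j _; rfl
  | cons x rest ih =>
    intro i j h
    have hx := h x (by simp)
    have hstep : step2 (i, j) x = (i, j) := by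
      simp only [step2]; split_ifs <;> (try rfl) <;> omega
    rw [List.foldl_cons, hstep]
    exact ih i j (fun z hz => h z (by simp [hz]))

theorem solve_eq (arr : List Int) : solve arr = solve_alt arr := by
  haveI : RightCommutative step2 := ⟨step2_right_comm⟩
  have hperm : (PySem.List.sorted arr (fun x => x) true).Perm arr :=
    PySem.List.sorted_perm arr (fun x => x) true
  have hpw : (PySem.List.sorted arr (fun x => x) true).Pairwise (fun a b => b ≤ a) :=
    PySem.List.sorted_pairwise_rev arr (fun x => x)
  have key : solveGo arr 0 0 0 0 =
      (PySem.List.sorted arr (fun x => x) true).foldl step2 (0, 0) := by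
    rw [solveGo_zero, hperm.foldl_eq (0, 0)]
  simp only [solve, solve_alt, key]
  cases hs : PySem.List.sorted arr (fun x => x) true with
  | nil => rfl
  | cons x t =>
    rw [hs] at hpw
    cases t with
    | nil =>
      simp only [List.foldl_cons, List.foldl_nil, step2]
      split_ifs <;> simp_all
    | cons y t2 =>
      have hyx : y ≤ x := (List.pairwise_cons.mp hpw).1 y (by simp)
      have ht2 : ∀ z ∈ t2, z ≤ y ∧ z ≤ x := by
        intro z hz
        have h1 := (List.pairwise_cons.mp hpw).1 z (by simp [hz])
        have h2 := (List.pairwise_cons.mp (List.pairwise_cons.mp hpw).2).1 z hz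
        exact ⟨h2, h1⟩
      simp only [List.foldl_cons]
      by_cases hx : x > (0 : Int)
      · by_cases hy : y > (0 : Int)
        · rw [show step2 (0, 0) x = (x, 0) by simp [step2, hx],
              show step2 (x, 0) y = (x, y) by
                simp only [step2]; rw [if_neg (by omega), if_pos hy],
              foldl_step2_noop t2 x y (fun z hz => ⟨(ht2 z hz).2, (ht2 z hz).1⟩)]
          simp [hx, hy]
        · rw [show step2 (0, 0) x = (x, 0) by simp [step2, hx],
              show step2 (x, 0) y = (x, 0) by
                simp only [step2]; rw [if_neg (by omega), if_neg (by omega)],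
              foldl_step2_noop t2 x 0
                (fun z hz => ⟨(ht2 z hz).2, by have := (ht2 z hz).1; omega⟩)]
          simp [hx, hy]
      · have hy : ¬ y > (0 : Int) := by omega
        rw [show step2 (0, 0) x = (0, 0) by
              simp only [step2]; rw [if_neg (by omega), if_neg (by omega)],
            show step2 (0, 0) y = (0, 0) by
              simp only [step2]; rw [if_neg (by omega), if_neg (by omega)],
            foldl_step2_noop t2 0 0 (fun z hz => by have := ht2 z hz; omega)]
        simp [hx, hy]

-- ===== VERDICT (by name: the statement is the Claim_ definition above) =====
theorem solve_spec : Claim_equal_solve := by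
  intro arr _
  unfold Spec_solve
  exact solve_eq arr
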